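-- pv_equiv track=rewrite | github.com/Benjamin-VRB/IN200_Sudoku | Grille/Archive.py | compter_taille_groupe_horizontal_kakuro
-- ===== SOURCE A (Python) =====
-- def compter_taille_groupe_horizontal_kakuro(grille : list[list:int], ligne, colonne, dimension):
--     # Compter à gauche
--     taille = 0
--     c = colonne - 1
--     while c >= 0 and grille[ligne][c] == 0:
--         taille += 1
--         c -= 1
--
--     # Compter à droite
--     c = colonne + 1
--     while c < dimension and grille[ligne][c] == 0:
--         taille += 1
--         c += 1
--
--     # Si on coupe un groupe existant, il doit rester >= 2
--     if taille == 1: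
--         return False
--
--     return True
-- ===== SOURCE B (Python) =====
-- def compter_taille_groupe_horizontal_kakuro(grille, ligne, colonne, dimension):
--     def zero(j):
--         # a playable zero cell of the row, inside the board
--         return 0 <= j < dimension and grille[ligne][j] == 0
--
--     # category of the left side: 0 = no zero neighbour, 1 = exactly one, 2 = two or more
--     if not zero(colonne - 1):
--         lc = 0
--     elif not zero(colonne - 2):
--         lc = 1
--     else:
--         lc = 2
--     # same for the right side
--     if not zero(colonne + 1):
--         rc = 0
--     elif not zero(colonne + 2):
--         rc = 1
--     else:
--         rc = 2
--
--     # the surrounding zero-run has size 1 exactly when one side has exactly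
--     # one zero cell and the other side has none
--     return not ((lc == 1 and rc == 0) or (lc == 0 and rc == 1))
-- ===== Notes on version B (the rewrite author's own statement) =====
-- stated objective: faster
-- what changed: Replaces the two O(dimension) while-loop scans with a constant-work inspection of at most the two nearest cells on each side, classifying each side as 0/1/2+ adjacent zeros and deciding from those two categories.
-- outside the precondition, e.g. on compter_taille_groupe_horizontal_kakuro([[1, 0]], 0, 2, 0): A returns False, B returns True; on compter_taille_groupe_horizontal_kakuro([[0, 1, 1]], 0, -4, -2): A returns False, B returns True
import Mathlib
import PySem

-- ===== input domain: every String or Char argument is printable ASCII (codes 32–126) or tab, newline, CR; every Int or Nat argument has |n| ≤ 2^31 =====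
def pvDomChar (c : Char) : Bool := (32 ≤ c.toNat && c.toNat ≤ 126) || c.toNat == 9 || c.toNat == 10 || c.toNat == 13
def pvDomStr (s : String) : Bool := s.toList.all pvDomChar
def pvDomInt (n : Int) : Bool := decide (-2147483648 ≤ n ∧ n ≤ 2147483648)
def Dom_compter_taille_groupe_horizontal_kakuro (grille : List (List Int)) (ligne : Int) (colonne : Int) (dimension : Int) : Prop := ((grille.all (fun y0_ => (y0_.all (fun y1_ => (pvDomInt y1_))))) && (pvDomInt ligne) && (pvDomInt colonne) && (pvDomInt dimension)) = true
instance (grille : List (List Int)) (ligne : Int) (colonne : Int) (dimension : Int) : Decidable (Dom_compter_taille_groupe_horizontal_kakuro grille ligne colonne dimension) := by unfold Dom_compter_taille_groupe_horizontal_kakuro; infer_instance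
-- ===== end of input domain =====

-- B replaces A's two O(dimension) boundary scans with a constant-work check of the
-- two nearest cells on each side (objective: faster); equality proved on Pre_.

-- ===== PORT A =====
-- grille[ligne][c] as Python evaluates it (none = IndexError, excluded by Pre_)
def pvCellA (grille : List (List Int)) (ligne c : Int) : Option Int :=
  (PySem.List.pyGet? grille ligne).bind (fun row => PySem.List.pyGet? row c)

-- the left while-loop: while c >= 0 and grille[ligne][c] == 0: taille += 1; c -= 1
def pvScanL (grille : List (List Int)) (ligne : Int) (c taille : Int) : Int :=
  if 0 ≤ c ∧ pvCellA grille ligne c = some 0 then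
    pvScanL grille ligne (c - 1) (taille + 1)
  else taille
termination_by (c + 1).toNat
decreasing_by omega

-- the right while-loop: while c < dimension and grille[ligne][c] == 0: taille += 1; c += 1
def pvScanR (grille : List (List Int)) (ligne dimension : Int) (c taille : Int) : Int :=
  if c < dimension ∧ pvCellA grille ligne c = some 0 then
    pvScanR grille ligne dimension (c + 1) (taille + 1)
  else taille
termination_by (dimension - c).toNat
decreasing_by omega

def compter_taille_groupe_horizontal_kakuro (grille : List (List Int)) (ligne : Int) (colonne : Int) (dimension : Int) : Bool :=
  let taille := pvScanL grille ligne (colonne - 1) 0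
  let taille := pvScanR grille ligne dimension (colonne + 1) taille
  if taille = 1 then false else true

-- ===== PORT B =====
-- grille[ligne][j] as Python evaluates it inside zero(j) (only reached when 0 <= j < dimension)
def pvCellB (grille : List (List Int)) (ligne j : Int) : Option Int :=
  (PySem.List.pyGet? grille ligne).bind (fun row => PySem.List.pyGet? row j)

-- zero(j) from Source B: 0 <= j < dimension and grille[ligne][j] == 0
def pvZeroB (grille : List (List Int)) (ligne dimension j : Int) : Bool :=
  decide (0 ≤ j ∧ j < dimension) && (pvCellB grille ligne j == some 0)

-- the side category: 0 = no adjacent zero, 1 = exactly one, 2 = two or more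
def pvCat (grille : List (List Int)) (ligne dimension near far : Int) : Int :=
  if ¬ pvZeroB grille ligne dimension near then 0
  else if ¬ pvZeroB grille ligne dimension far then 1
  else 2

def compter_taille_groupe_horizontal_kakuro_alt (grille : List (List Int)) (ligne : Int) (colonne : Int) (dimension : Int) : Bool :=
  let lc := pvCat grille ligne dimension (colonne - 1) (colonne - 2)
  let rc := pvCat grille ligne dimension (colonne + 1) (colonne + 2)
  !((lc == 1 && rc == 0) || (lc == 0 && rc == 1))

-- ===== PRECONDITION & SPEC =====
-- Pre_ is A's natural raise-free domain: either no cell is ever read (both scans vacuous),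
-- or ligne is a valid row index and the cell coordinates keep every read inside the row:
-- -1 ≤ colonne ≤ dimension with the right scan bounded (by dimension, the row length, or a
-- filled stopping cell), or a colonne outside [−1, dimension] whose single read hits a filled
-- cell so that no further cell is read. Outside Pre_, A raises IndexError or returns a value
-- shaped by negative-index wraparound / scanning beyond dimension, which B does not reproduce.
def Pre_compter_taille_groupe_horizontal_kakuro (grille : List (List Int)) (ligne : Int) (colonne : Int) (dimension : Int) : Prop :=
  (colonne ≤ 0 ∧ dimension ≤ colonne + 1) ∨
    (PySem.Raise.InRange grille.length ligne ∧
      ((-1 ≤ colonne ∧ colonne ≤ dimension ∧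
          colonne ≤ ((PySem.List.pyGet? grille ligne).getD []).length ∧
          (dimension ≤ colonne + 1 ∨
            dimension ≤ ((PySem.List.pyGet? grille ligne).getD []).length ∨
            (((PySem.List.pyGet? grille ligne).getD []).drop (colonne + 1).toNat).any
              (fun v => !(v == 0)) = true)) ∨
        (dimension < colonne ∧ 1 ≤ colonne ∧
          colonne ≤ ((PySem.List.pyGet? grille ligne).getD []).length ∧
          PySem.List.pyGet? ((PySem.List.pyGet? grille ligne).getD []) (colonne - 1) ≠ some 0) ∨
        (colonne ≤ -2 ∧
          PySem.List.pyGet? ((PySem.List.pyGet? grille ligne).getD []) (colonne + 1) ≠ none ∧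
          PySem.List.pyGet? ((PySem.List.pyGet? grille ligne).getD []) (colonne + 1) ≠ some 0)))
instance (grille : List (List Int)) (ligne : Int) (colonne : Int) (dimension : Int) : Decidable (Pre_compter_taille_groupe_horizontal_kakuro grille ligne colonne dimension) := by unfold Pre_compter_taille_groupe_horizontal_kakuro; infer_instance

def pvWitness_compter_taille_groupe_horizontal_kakuro : List (List Int) × Int × Int × Int :=
  ([[1, 0, 0], [0, 5, 0]], 1, 1, 3)

def Spec_compter_taille_groupe_horizontal_kakuro (grille : List (List Int)) (ligne : Int) (colonne : Int) (dimension : Int) (out : Bool) : Prop := out = compter_taille_groupe_horizontal_kakuro_alt grille ligne colonne dimension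
instance (grille : List (List Int)) (ligne : Int) (colonne : Int) (dimension : Int) (out : Bool) : Decidable (Spec_compter_taille_groupe_horizontal_kakuro grille ligne colonne dimension out) := by unfold Spec_compter_taille_groupe_horizontal_kakuro; infer_instance

-- ===== CLAIM (what is proved, stated in full; the proofs are below) =====
def Claim_equal_compter_taille_groupe_horizontal_kakuro : Prop := ∀ (grille : List (List Int)) (ligne : Int) (colonne : Int) (dimension : Int), Dom_compter_taille_groupe_horizontal_kakuro grille ligne colonne dimension → Pre_compter_taille_groupe_horizontal_kakuro grille ligne colonne dimension → Spec_compter_taille_groupe_horizontal_kakuro grille ligne colonne dimension (compter_taille_groupe_horizontal_kakuro grille ligne colonne dimension)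

-- ===== LEMMAS AND PROOFS =====

-- the accumulator only shifts the result
theorem pvScanL_acc (grille : List (List Int)) (ligne : Int) (c t : Int) :
    pvScanL grille ligne c t = pvScanL grille ligne c 0 + t := by
  by_cases h : 0 ≤ c ∧ pvCellA grille ligne c = some 0
  · conv_lhs => rw [pvScanL, if_pos h]
    conv_rhs => rw [pvScanL, if_pos h]
    rw [pvScanL_acc grille ligne (c - 1) (t + 1), pvScanL_acc grille ligne (c - 1) (0 + 1)]
    omega
  · conv_lhs => rw [pvScanL, if_neg h]
    conv_rhs => rw [pvScanL, if_neg h]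
    omega
termination_by (c + 1).toNat
decreasing_by all_goals omega

theorem pvScanR_acc (grille : List (List Int)) (ligne dimension : Int) (c t : Int) :
    pvScanR grille ligne dimension c t = pvScanR grille ligne dimension c 0 + t := by
  by_cases h : c < dimension ∧ pvCellA grille ligne c = some 0
  · conv_lhs => rw [pvScanR, if_pos h]
    conv_rhs => rw [pvScanR, if_pos h]
    rw [pvScanR_acc grille ligne dimension (c + 1) (t + 1),
      pvScanR_acc grille ligne dimension (c + 1) (0 + 1)]
    omega
  · conv_lhs => rw [pvScanR, if_neg h]
    conv_rhs => rw [pvScanR, if_neg h]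
    omega
termination_by (dimension - c).toNat
decreasing_by all_goals omega

theorem pvScanL_le (grille : List (List Int)) (ligne : Int) (c t : Int) :
    t ≤ pvScanL grille ligne c t := by
  by_cases h : 0 ≤ c ∧ pvCellA grille ligne c = some 0
  · rw [pvScanL, if_pos h]
    have := pvScanL_le grille ligne (c - 1) (t + 1); omega
  · rw [pvScanL, if_neg h]
termination_by (c + 1).toNat
decreasing_by all_goals omega

theorem pvScanR_le (grille : List (List Int)) (ligne dimension : Int) (c t : Int) :
    t ≤ pvScanR grille ligne dimension c t := by
  by_cases h : c < dimension ∧ pvCellA grille ligne c = some 0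
  · rw [pvScanR, if_pos h]
    have := pvScanR_le grille ligne dimension (c + 1) (t + 1); omega
  · rw [pvScanR, if_neg h]
termination_by (dimension - c).toNat
decreasing_by all_goals omega

theorem pvScanL_unfold (grille : List (List Int)) (ligne c : Int) :
    pvScanL grille ligne c 0 =
      if 0 ≤ c ∧ pvCellA grille ligne c = some 0 then pvScanL grille ligne (c - 1) 0 + 1 else 0 := by
  rw [pvScanL]
  split_ifs with h
  · rw [pvScanL_acc]; omega
  · rfl

theorem pvScanR_unfold (grille : List (List Int)) (ligne dimension c : Int) :
    pvScanR grille ligne dimension c 0 =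
      if c < dimension ∧ pvCellA grille ligne c = some 0 then
        pvScanR grille ligne dimension (c + 1) 0 + 1 else 0 := by
  rw [pvScanR]
  split_ifs with h
  · rw [pvScanR_acc]; omega
  · rfl

-- ===== VERDICT (by name: the statement is the Claim_ definition above) =====
theorem compter_taille_groupe_horizontal_kakuro_spec : Claim_equal_compter_taille_groupe_horizontal_kakuro := by
  intro g l col dim _ pre
  unfold Spec_compter_taille_groupe_horizontal_kakuro
  have hcellrow : ∀ j : Int,
      pvCellA g l j = PySem.List.pyGet? ((PySem.List.pyGet? g l).getD []) j ∨
        PySem.List.pyGet? g l = none := by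
    intro j
    cases hE : PySem.List.pyGet? g l with
    | none => right; rfl
    | some r => left; simp [pvCellA, hE]
  rcases pre with ⟨ht1, ht2⟩ | ⟨hInR, ⟨hm1, hm2, -, -⟩ | ⟨hc1, hc2, -, hc4⟩ | ⟨hd1, -, hd3⟩⟩
  · -- both scans are vacuous and both neighbour tests fail their bound check
    have hL0 : pvScanL g l (col - 1) 0 = 0 := by
      rw [pvScanL, if_neg]; rintro ⟨h, -⟩; omega
    have hR0 : ∀ t, pvScanR g l dim (col + 1) t = t := by
      intro t; rw [pvScanR, if_neg]; rintro ⟨h, -⟩; omega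
    have hz1 : pvZeroB g l dim (col - 1) = false := by
      simp only [pvZeroB, Bool.and_eq_false_iff, decide_eq_false_iff_not]
      left; omega
    have hz3 : pvZeroB g l dim (col + 1) = false := by
      simp only [pvZeroB, Bool.and_eq_false_iff, decide_eq_false_iff_not]
      left; omega
    simp [compter_taille_groupe_horizontal_kakuro, compter_taille_groupe_horizontal_kakuro_alt,
      hL0, hR0, pvCat, hz1, hz3]
  · -- every index the programs compare lies on the board side they look at
    have hz : ∀ j : Int, (pvZeroB g l dim j = true) ↔
        (0 ≤ j ∧ j < dim ∧ pvCellA g l j = some 0) := by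
      intro j
      simp [pvZeroB, pvCellB, pvCellA, and_assoc]
    have hzL : ∀ j : Int, j < dim →
        ((0 ≤ j ∧ pvCellA g l j = some 0) ↔ pvZeroB g l dim j = true) := by
      intro j hj
      rw [hz]
      constructor
      · rintro ⟨h0, hg⟩; exact ⟨h0, hj, hg⟩
      · rintro ⟨h0, _, hg⟩; exact ⟨h0, hg⟩
    have hzR : ∀ j : Int, 0 ≤ j →
        ((j < dim ∧ pvCellA g l j = some 0) ↔ pvZeroB g l dim j = true) := by
      intro j hj
      rw [hz]
      constructor
      · rintro ⟨h0, hg⟩; exact ⟨hj, h0, hg⟩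
      · rintro ⟨_, h0, hg⟩; exact ⟨h0, hg⟩
    -- the two side categories characterise the scans
    have hlc : (pvCat g l dim (col - 1) (col - 2) = 0 ∧ pvScanL g l (col - 1) 0 = 0) ∨
        (pvCat g l dim (col - 1) (col - 2) = 1 ∧ pvScanL g l (col - 1) 0 = 1) ∨
        (pvCat g l dim (col - 1) (col - 2) = 2 ∧ 2 ≤ pvScanL g l (col - 1) 0) := by
      cases h1 : pvZeroB g l dim (col - 1) with
      | false =>
          left
          have hn1 : ¬ (0 ≤ col - 1 ∧ pvCellA g l (col - 1) = some 0) := by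
            intro hcnd
            rw [(hzL (col - 1) (by omega)).mp hcnd] at h1
            cases h1
          refine ⟨by simp [pvCat, h1], ?_⟩
          rw [pvScanL_unfold, if_neg hn1]
      | true =>
          have hcnd1 := (hzL (col - 1) (by omega)).mpr h1
          cases h2 : pvZeroB g l dim (col - 2) with
          | false =>
              right; left
              have hn2 : ¬ (0 ≤ col - 1 - 1 ∧ pvCellA g l (col - 1 - 1) = some 0) := by
                rintro ⟨ha, hb⟩
                rw [show col - 1 - 1 = col - 2 by ring] at hb
                rw [(hzL (col - 2) (by omega)).mp ⟨by omega, hb⟩] at h2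
                cases h2
              refine ⟨by simp [pvCat, h1, h2], ?_⟩
              rw [pvScanL_unfold, if_pos hcnd1, pvScanL_unfold, if_neg hn2]; omega
          | true =>
              right; right
              have hcnd2 := (hzL (col - 2) (by omega)).mpr h2
              have hcnd2' : 0 ≤ col - 1 - 1 ∧ pvCellA g l (col - 1 - 1) = some 0 := by
                rw [show col - 1 - 1 = col - 2 by ring]
                exact hcnd2
              refine ⟨by simp [pvCat, h1, h2], ?_⟩
              rw [pvScanL_unfold, if_pos hcnd1, pvScanL_unfold, if_pos hcnd2']
              have := pvScanL_le g l (col - 1 - 1 - 1) 0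
              omega
    have hrc : (pvCat g l dim (col + 1) (col + 2) = 0 ∧ pvScanR g l dim (col + 1) 0 = 0) ∨
        (pvCat g l dim (col + 1) (col + 2) = 1 ∧ pvScanR g l dim (col + 1) 0 = 1) ∨
        (pvCat g l dim (col + 1) (col + 2) = 2 ∧ 2 ≤ pvScanR g l dim (col + 1) 0) := by
      cases h1 : pvZeroB g l dim (col + 1) with
      | false =>
          left
          have hn1 : ¬ (col + 1 < dim ∧ pvCellA g l (col + 1) = some 0) := by
            intro hcnd
            rw [(hzR (col + 1) (by omega)).mp hcnd] at h1
            cases h1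
          refine ⟨by simp [pvCat, h1], ?_⟩
          rw [pvScanR_unfold, if_neg hn1]
      | true =>
          have hcnd1 := (hzR (col + 1) (by omega)).mpr h1
          cases h2 : pvZeroB g l dim (col + 2) with
          | false =>
              right; left
              have hn2 : ¬ (col + 1 + 1 < dim ∧ pvCellA g l (col + 1 + 1) = some 0) := by
                rintro ⟨ha, hb⟩
                rw [show col + 1 + 1 = col + 2 by ring] at ha hb
                rw [(hzR (col + 2) (by omega)).mp ⟨ha, hb⟩] at h2
                cases h2
              refine ⟨by simp [pvCat, h1, h2], ?_⟩
              rw [pvScanR_unfold, if_pos hcnd1, pvScanR_unfold, if_neg hn2]; omega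
          | true =>
              right; right
              have hcnd2 := (hzR (col + 2) (by omega)).mpr h2
              have hcnd2' : col + 1 + 1 < dim ∧ pvCellA g l (col + 1 + 1) = some 0 := by
                rw [show col + 1 + 1 = col + 2 by ring]
                exact hcnd2
              refine ⟨by simp [pvCat, h1, h2], ?_⟩
              rw [pvScanR_unfold, if_pos hcnd1, pvScanR_unfold, if_pos hcnd2']
              have := pvScanR_le g l dim (col + 1 + 1 + 1) 0
              omega
    simp only [compter_taille_groupe_horizontal_kakuro, compter_taille_groupe_horizontal_kakuro_alt]
    rw [pvScanR_acc g l dim (col + 1) (pvScanL g l (col - 1) 0)]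
    rcases hlc with ⟨hlc0, hl⟩ | ⟨hlc0, hl⟩ | ⟨hlc0, hl⟩ <;>
      rcases hrc with ⟨hrc0, hr⟩ | ⟨hrc0, hr⟩ | ⟨hrc0, hr⟩ <;>
        rw [hlc0, hrc0] <;> split_ifs with hif <;> first | rfl | (exfalso; omega)
  · -- colonne right of the board window: A's left scan stops at the filled cell colonne-1,
    -- its right scan is vacuous; B's four bound checks all fail — both return true
    have hcell : pvCellA g l (col - 1) ≠ some 0 := by
      rcases hcellrow (col - 1) with h | h
      · rw [h]; exact hc4
      · rw [PySem.List.pyGet?_eq_none_iff] at h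
        exact absurd hInR h
    have hL0 : pvScanL g l (col - 1) 0 = 0 := by
      rw [pvScanL, if_neg]; rintro ⟨-, hx⟩; exact hcell hx
    have hR0 : ∀ t, pvScanR g l dim (col + 1) t = t := by
      intro t; rw [pvScanR, if_neg]; rintro ⟨hx, -⟩; omega
    have hz1 : pvZeroB g l dim (col - 1) = false := by
      simp only [pvZeroB, Bool.and_eq_false_iff, decide_eq_false_iff_not]
      left; omega
    have hz3 : pvZeroB g l dim (col + 1) = false := by
      simp only [pvZeroB, Bool.and_eq_false_iff, decide_eq_false_iff_not]
      left; omega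
    simp [compter_taille_groupe_horizontal_kakuro, compter_taille_groupe_horizontal_kakuro_alt,
      hL0, hR0, pvCat, hz1, hz3]
  · -- colonne left of the board: A's left scan is vacuous, its right scan stops at the
    -- filled cell colonne+1; B's four bound checks all fail — both return true
    have hcell : pvCellA g l (col + 1) ≠ some 0 := by
      rcases hcellrow (col + 1) with h | h
      · rw [h]; exact hd3
      · rw [PySem.List.pyGet?_eq_none_iff] at h
        exact absurd hInR h
    have hL0 : pvScanL g l (col - 1) 0 = 0 := by
      rw [pvScanL, if_neg]; rintro ⟨hx, -⟩; omega
    have hR0 : ∀ t, pvScanR g l dim (col + 1) t = t := by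
      intro t; rw [pvScanR, if_neg]; rintro ⟨-, hx⟩; exact hcell hx
    have hz1 : pvZeroB g l dim (col - 1) = false := by
      simp only [pvZeroB, Bool.and_eq_false_iff, decide_eq_false_iff_not]
      left; omega
    have hz3 : pvZeroB g l dim (col + 1) = false := by
      simp only [pvZeroB, Bool.and_eq_false_iff, decide_eq_false_iff_not]
      left; omega
    simp [compter_taille_groupe_horizontal_kakuro, compter_taille_groupe_horizontal_kakuro_alt,
      hL0, hR0, pvCat, hz1, hz3]
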